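-- pv_equiv track=rewrite | github.com/filkayar/task_1 | 4/edit.py | get_perimeter_elements
-- ===== SOURCE A (Python) =====
-- def get_perimeter_elements(matrix):
--     perimeter_elements = []
--     # Получение размеров матрицы
--     rows = len(matrix)
--     if rows == 0:
--         return perimeter_elements
--     columns = len(matrix[0])
--     # Запись верхней строки
--     for i in range(columns):
--         perimeter_elements.append(matrix[0][i])
--     # Запись правого столбца
--     for i in range(1, rows):
--         perimeter_elements.append(matrix[i][columns - 1])
--     # Запись нижней строки (если есть)
--     if rows > 1:
--         for i in range(columns - 2, -1, -1):
--             perimeter_elements.append(matrix[rows - 1][i])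
--
--     # Запись левого столбца (если есть)
--     if columns > 1:
--         for i in range(rows - 2, 0, -1):
--             perimeter_elements.append(matrix[i][0])
--
--     return perimeter_elements
-- ===== SOURCE B (Python) =====
-- def get_perimeter_elements(matrix):
--     rows = len(matrix)
--     if rows == 0:
--         return []
--     c = len(matrix[0])
--     # lengths of the four clockwise perimeter segments
--     top = c
--     right = rows - 1
--     bottom = max(c - 1, 0) if rows > 1 else 0
--     left = max(rows - 2, 0) if c > 1 else 0
--
--     def coord(k):
--         # closed-form map from the perimeter position k to its (row, column)
--         if k < top:
--             return 0, k
--         if k < top + right: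
--             return k - top + 1, c - 1
--         if k < top + right + bottom:
--             return rows - 1, c - 2 - (k - top - right)
--         return rows - 2 - (k - top - right - bottom), 0
--
--     return [matrix[i][j] for i, j in map(coord, range(top + right + bottom + left))]
-- ===== Notes on version B (the rewrite author's own statement) =====
-- stated objective: alternative
-- what changed: A's four explicit boundary loops (top row, right column, reversed bottom row, reversed left column) are replaced by one pass over a single range of perimeter positions with a closed-form map from position k to its (row, column) coordinate.
import Mathlib
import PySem

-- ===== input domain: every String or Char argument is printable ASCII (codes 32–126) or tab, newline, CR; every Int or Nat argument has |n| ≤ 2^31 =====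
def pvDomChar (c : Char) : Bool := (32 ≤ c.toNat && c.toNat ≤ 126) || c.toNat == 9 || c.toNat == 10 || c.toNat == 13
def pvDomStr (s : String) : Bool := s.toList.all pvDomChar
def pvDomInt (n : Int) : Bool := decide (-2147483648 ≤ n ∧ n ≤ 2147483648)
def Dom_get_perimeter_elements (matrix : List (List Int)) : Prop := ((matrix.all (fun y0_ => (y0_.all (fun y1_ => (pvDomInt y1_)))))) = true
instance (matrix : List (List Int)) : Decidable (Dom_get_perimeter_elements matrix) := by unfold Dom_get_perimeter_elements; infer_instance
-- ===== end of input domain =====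

-- B replaces A's four boundary loops by a single closed-form map from the
-- perimeter position k to its (row, column) coordinate over one range
-- (objective: alternative decomposition, same cost).

-- ===== PORT A =====
-- matrix[i][j] with Python index semantics (shared by both ports)
def pvAt (matrix : List (List Int)) (i j : Int) : Int :=
  PySem.List.pyGetD (PySem.List.pyGetD matrix i []) j 0

def get_perimeter_elements (matrix : List (List Int)) : List Int :=
  let rows : Int := matrix.length
  if rows = 0 then [] else
  let columns : Int := ((PySem.List.pyGetD matrix 0 []).length : Int)
  let pe1 := (PySem.List.pyRange 0 columns 1).foldl
      (fun acc i => acc ++ [pvAt matrix 0 i]) []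
  let pe2 := (PySem.List.pyRange 1 rows 1).foldl
      (fun acc i => acc ++ [pvAt matrix i (columns - 1)]) pe1
  let pe3 := if rows > 1 then
      (PySem.List.pyRange (columns - 2) (-1) (-1)).foldl
        (fun acc i => acc ++ [pvAt matrix (rows - 1) i]) pe2
    else pe2
  if columns > 1 then
      (PySem.List.pyRange (rows - 2) 0 (-1)).foldl
        (fun acc i => acc ++ [pvAt matrix i 0]) pe3
    else pe3

def pvCoord (top right bottom c rows : Int) (k : Int) : Int × Int :=
  if k < top then (0, k)
  else if k < top + right then (k - top + 1, c - 1)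
  else if k < top + right + bottom then (rows - 1, c - 2 - (k - top - right))
  else (rows - 2 - (k - top - right - bottom), 0)

def get_perimeter_elements_alt (matrix : List (List Int)) : List Int :=
  let rows : Int := matrix.length
  if rows = 0 then [] else
  let c : Int := ((PySem.List.pyGetD matrix 0 []).length : Int)
  let top := c
  let right := rows - 1
  let bottom := if rows > 1 then max (c - 1) 0 else 0
  let left := if c > 1 then max (rows - 2) 0 else 0
  (PySem.List.pyRange 0 (top + right + bottom + left) 1).map
    (fun k =>
      let ij := pvCoord top right bottom c rows k
      pvAt matrix ij.1 ij.2)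


-- ===== PRECONDITION & SPEC =====
-- Pre_ excludes exactly the inputs on which the Python A raises IndexError:
-- a matrix with some row after the first shorter than the first row (or empty
-- when the first row is empty, where index columns-1 = -1 falls on an empty row).
def Pre_get_perimeter_elements (matrix : List (List Int)) : Prop :=
  ∀ row ∈ matrix.tail, max (matrix.headD []).length 1 ≤ row.length
instance (matrix : List (List Int)) : Decidable (Pre_get_perimeter_elements matrix) := by
  unfold Pre_get_perimeter_elements; infer_instance
def pvWitness_get_perimeter_elements : List (List Int) := [[1, 2], [3, 4]]

def Spec_get_perimeter_elements (matrix : List (List Int)) (out : List Int) : Prop := out = get_perimeter_elements_alt matrix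
instance (matrix : List (List Int)) (out : List Int) : Decidable (Spec_get_perimeter_elements matrix out) := by unfold Spec_get_perimeter_elements; infer_instance

-- ===== CLAIM (what is proved, stated in full; the proofs are below) =====
def Claim_equal_get_perimeter_elements : Prop := ∀ (matrix : List (List Int)), Dom_get_perimeter_elements matrix → Pre_get_perimeter_elements matrix → Spec_get_perimeter_elements matrix (get_perimeter_elements matrix)

-- ===== LEMMAS AND PROOFS =====
theorem map_range_split {α : Type} (f : Nat → α) (a b : Nat) :
    List.map f (List.range (a + b)) =
      List.map f (List.range a) ++ List.map (fun k => f (a + k)) (List.range b) := by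
  simp [List.range_add, List.map_map]

theorem pvAt_congr (m : List (List Int)) {i j i' j' : Int} (hi : i = i') (hj : j = j') :
    pvAt m i j = pvAt m i' j' := by rw [hi, hj]

theorem ports_agree (matrix : List (List Int)) :
    get_perimeter_elements matrix = get_perimeter_elements_alt matrix := by
  unfold get_perimeter_elements get_perimeter_elements_alt
  by_cases h0 : (matrix.length : Int) = 0
  · simp [h0]
  · simp only [h0]
    set C : Nat := (PySem.List.pyGetD matrix 0 []).length with hC
    set R : Nat := matrix.length with hR
    clear_value C R
    have hR1 : 1 ≤ R := by omega
    simp only [PySem.List.foldl_append_singleton_eq_map, PySem.List.pyRange_one,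
      PySem.List.pyRange_neg_one, List.nil_append, List.map_map]
    have hmax1 : max ((C:Int) - 1) 0 = ((C - 1 : Nat) : Int) := by omega
    have hmax2 : max ((R:Int) - 2) 0 = ((R - 2 : Nat) : Int) := by omega
    by_cases hr : (1:Int) < (R:Int) <;> by_cases hc : (1:Int) < (C:Int) <;>
      simp only [hr, hc, ite_true, ite_false, hmax1, hmax2]
    · -- R ≥ 2, C ≥ 2 : four segments
      rw [show (((C:Int) + ((R:Int) - 1) + ((C - 1 : Nat) : Int) + ((R - 2 : Nat) : Int)) - 0).toNat
            = C + ((R - 1) + ((C - 1) + (R - 2))) from by omega,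
          show ((C:Int) - 0).toNat = C from by omega,
          show ((R:Int) - 1).toNat = R - 1 from by omega,
          show ((C:Int) - 2 - -1).toNat = C - 1 from by omega,
          show ((R:Int) - 2 - 0).toNat = R - 2 from by omega,
          map_range_split, map_range_split, map_range_split, List.append_assoc, List.append_assoc]
      congr 1
      · apply List.map_congr_left; intro k hk
        simp only [List.mem_range] at hk
        simp only [Function.comp, pvCoord]
        split_ifs <;> dsimp only <;> (try (exfalso; omega)) <;> (apply pvAt_congr <;> omega)
      congr 1
      · apply List.map_congr_left; intro k hk
        simp only [List.mem_range] at hk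
        simp only [Function.comp, pvCoord]
        split_ifs <;> dsimp only <;> (try (exfalso; omega)) <;> (apply pvAt_congr <;> omega)
      congr 1
      · apply List.map_congr_left; intro k hk
        simp only [List.mem_range] at hk
        simp only [Function.comp, pvCoord]
        split_ifs <;> dsimp only <;> (try (exfalso; omega)) <;> (apply pvAt_congr <;> omega)
      · apply List.map_congr_left; intro k hk
        simp only [List.mem_range] at hk
        simp only [Function.comp, pvCoord]
        split_ifs <;> dsimp only <;> (try (exfalso; omega)) <;> (apply pvAt_congr <;> omega)
    · -- R ≥ 2, C ≤ 1 : top and right only (bottom count 0)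
      rw [show (((C:Int) + ((R:Int) - 1) + ((C - 1 : Nat) : Int) + 0) - 0).toNat
            = C + (R - 1) from by omega,
          show ((C:Int) - 0).toNat = C from by omega,
          show ((R:Int) - 1).toNat = R - 1 from by omega,
          show ((C:Int) - 2 - -1).toNat = 0 from by omega,
          map_range_split]
      simp only [List.range_zero, List.map_nil, List.append_nil]
      congr 1
      · apply List.map_congr_left; intro k hk
        simp only [List.mem_range] at hk
        simp only [Function.comp, pvCoord]
        split_ifs <;> dsimp only <;> (try (exfalso; omega)) <;> (apply pvAt_congr <;> omega)
      · apply List.map_congr_left; intro k hk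
        simp only [List.mem_range] at hk
        simp only [Function.comp, pvCoord]
        split_ifs <;> dsimp only <;> (try (exfalso; omega)) <;> (apply pvAt_congr <;> omega)
    · -- R = 1, C ≥ 2 : top only (left count 0)
      rw [show (((C:Int) + ((R:Int) - 1) + 0 + ((R - 2 : Nat) : Int)) - 0).toNat
            = C from by omega,
          show ((C:Int) - 0).toNat = C from by omega,
          show ((R:Int) - 1).toNat = 0 from by omega,
          show ((R:Int) - 2 - 0).toNat = 0 from by omega]
      simp only [List.range_zero, List.map_nil, List.append_nil]
      apply List.map_congr_left; intro k hk
      simp only [List.mem_range] at hk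
      simp only [Function.comp, pvCoord]
      split_ifs <;> dsimp only <;> (try (exfalso; omega)) <;> (apply pvAt_congr <;> omega)
    · -- R = 1, C ≤ 1 : top only
      rw [show (((C:Int) + ((R:Int) - 1) + 0 + 0) - 0).toNat = C from by omega,
          show ((C:Int) - 0).toNat = C from by omega,
          show ((R:Int) - 1).toNat = 0 from by omega]
      simp only [List.range_zero, List.map_nil, List.append_nil]
      apply List.map_congr_left; intro k hk
      simp only [List.mem_range] at hk
      simp only [Function.comp, pvCoord]
      split_ifs <;> dsimp only <;> (try (exfalso; omega)) <;> (apply pvAt_congr <;> omega)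

-- ===== VERDICT (by name: the statement is the Claim_ definition above) =====
theorem get_perimeter_elements_spec : Claim_equal_get_perimeter_elements := by
  intro matrix _ _
  unfold Spec_get_perimeter_elements
  exact ports_agree matrix
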